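-- pv_equiv track=rewrite | github.com/josiahadrineda/Daily-Coding-Problems | 341_MaxWordsOnBoard.py | max_words
-- ===== SOURCE A (Python) =====
-- def max_words(bo, d):
--     """Given a matrix of lowercase letters BO and a dictionary of lowercase words D,
--     finds the maximum number of words that can fit on BO (found by stringing together
--     characters that are adjacent vertically and horizontally) without them overlapping.
--
--     >>> bo = [
--     ...     ['e', 'a', 'n'],
--     ...     ['t', 't', 'i'],
--     ...     ['a', 'r', 'a']
--     ... ]
--     >>> max_words(bo, ['eat', 'rain', 'in', 'rat'])
--     3
--     >>> max_words(bo, ['at', 'eat', 'rain', 'train'])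
--     3
--     """
--     assert bo, 'BO cannot be an emtpy matrix.'
--     assert d, 'D cannot be an empty list.'
--
--     def max_words_recur(d):
--         res = 0
--         for i,w in enumerate(d):
--             for _ in configurations(w):
--                 res = max(res, 1 + max_words_recur(d[:i] + d[i + 1:]))
--                 if res == len(d): return res
--         return res
--
--     def configurations(w):
--         def dfs(r, c, w):
--             if not w:
--                 yield True
--             elif not is_valid(r, c, w):
--                 yield False
--             else:
--                 visited[r][c] = True
--                 for dir_r, dir_c in (0, 1), (1, 0), (0, -1), (-1, 0):
--                     nr, nc = r + dir_r, c + dir_c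
--                     yield from dfs(nr, nc, w[1:])
--                 visited[r][c] = False
--
--         def is_valid(r, c, w):
--             return 0 <= r < m and 0 <= c < n \
--                 and visited[r][c] == False \
--                 and bo[r][c] == w[0]
--
--         for r in range(m):
--             for c in range(n):
--                 for valid_conf in dfs(r, c, w):
--                     if valid_conf:
--                         yield
--
--     def mark(visited, trace, marker):
--         for r,c in trace:
--             visited[r][c] = marker
--
--     m, n = len(bo), len(bo[0])
--     visited = [[False] * n for _ in range(m)]
--     return max_words_recur(d)
-- ===== SOURCE B (Python) =====
-- def max_words(bo, d):
--     """Max number of words from D placeable on BO as non-overlapping 4-adjacent paths."""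
--     assert bo, 'BO cannot be an emtpy matrix.'
--     assert d, 'D cannot be an empty list.'
--     m, n = len(bo), len(bo[0])
--     dirs = ((0, 1), (1, 0), (0, -1), (-1, 0))
--
--     def extend(r, c, w, path):
--         # all completed paths spelling w from (r, c), extending PATH (a tuple of cells)
--         if not w:
--             return [path]
--         if not (0 <= r < m and 0 <= c < n) or (r, c) in path or bo[r][c] != w[0]:
--             return []
--         out = []
--         for dr, dc in dirs:
--             out += extend(r + dr, c + dc, w[1:], ((r, c),) + path)
--         return out
--
--     # placement index: every valid placement of every word, computed once
--     plist = [[p for r in range(m) for c in range(n) for p in extend(r, c, w, ())]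
--              for w in d]
--
--     def best(i, occ):
--         # skip/take over the word index, OCC = cells already used
--         if i == len(plist):
--             return 0
--         r = best(i + 1, occ)
--         for p in plist[i]:
--             if all(x not in occ for x in p):
--                 r = max(r, 1 + best(i + 1, occ + p))
--         return r
--
--     return best(0, ())
-- ===== Notes on version B (the rewrite author's own statement) =====
-- stated objective: alternative
-- what changed: A re-runs the board DFS through a suspended generator with a shared mutable visited matrix at every node of a pick-any-remaining-word recursion with an early return; B enumerates every placement of every word once into an index and then runs a skip/take recursion over the word index with an explicit occupied-cell set.
-- outside the precondition, e.g. on max_words([['a', 'b'], ['c']], ['a']): A returns 1, B raises IndexError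
import Mathlib
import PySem

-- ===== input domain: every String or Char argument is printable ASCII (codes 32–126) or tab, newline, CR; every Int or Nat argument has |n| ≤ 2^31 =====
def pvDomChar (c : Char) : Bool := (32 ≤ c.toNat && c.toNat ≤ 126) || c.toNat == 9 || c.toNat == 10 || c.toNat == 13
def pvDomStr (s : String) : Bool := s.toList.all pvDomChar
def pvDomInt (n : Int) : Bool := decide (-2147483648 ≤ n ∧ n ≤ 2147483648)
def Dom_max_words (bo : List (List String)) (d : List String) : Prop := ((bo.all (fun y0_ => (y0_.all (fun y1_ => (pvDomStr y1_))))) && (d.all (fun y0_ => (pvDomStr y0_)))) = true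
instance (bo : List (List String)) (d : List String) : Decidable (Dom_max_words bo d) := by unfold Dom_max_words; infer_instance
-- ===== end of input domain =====

-- B replaces A's generator-based pick-any-word search (re-running the board DFS with a shared
-- visited matrix at every node) by a per-word placement index plus a skip/take recursion over
-- the word index with an explicit occupied set (objective: alternative, same exact value).


-- ===== PORT A =====
-- bo[r][c]; both ports only evaluate it after checking 0 ≤ r < m, 0 ≤ c < n, so under
-- Pre_ (rows at least as long as row 0) the getD defaults are never used; exact there.
def pvCell (bo : List (List String)) (r c : Int) : String :=
  (PySem.List.pyGet? ((PySem.List.pyGet? bo r).getD []) c).getD ""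

-- the direction tuple (0,1),(1,0),(0,-1),(-1,0) of A (B uses the same tuple)
def pvDirs : List (Int × Int) := [(0, 1), (1, 0), (0, -1), (-1, 0)]

-- A's dfs generator, purified: the list of the shared `visited` states at each `yield True`,
-- in generator order (False-yields produce nothing in `configurations`); the in-place
-- mark/unmark of `visited` is modeled by consing (r,c) for the recursive calls; the string w
-- is processed as its character list (w[0] / w[1:]); exact.
def dfsA (bo : List (List String)) (m n : Int) : List Char → List (Int × Int) → Int → Int → List (List (Int × Int))
  | [], visited, _, _ => [visited]
  | ch :: w', visited, r, c =>
    if 0 ≤ r ∧ r < m ∧ 0 ≤ c ∧ c < n ∧ (r, c) ∉ visited ∧ pvCell bo r c = String.singleton ch then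
      pvDirs.flatMap (fun dd => dfsA bo m n w' ((r, c) :: visited) (r + dd.1) (c + dd.2))
    else []

-- A's configurations(w): scan all start cells; each element is the full visited state while
-- the generator is suspended at that yield (the recursion of max_words_recur runs there).
def configsA (bo : List (List String)) (m n : Int) (visited : List (Int × Int)) (w : String) : List (List (Int × Int)) :=
  (PySem.List.pyRange 0 m 1).flatMap (fun r =>
    (PySem.List.pyRange 0 n 1).flatMap (fun c => dfsA bo m n w.toList visited r c))

-- the inner `for _ in configurations(w)` loop of max_words_recur, with the early return
-- `if res == len(d): return res` (second component: did it return early)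
def goConfsA (lenD : Int) (recur : List (Int × Int) → Int) : List (List (Int × Int)) → Int → Int × Bool
  | [], res => (res, false)
  | v :: vs, res =>
    let res' := max res (1 + recur v)
    if res' = lenD then (res', true) else goConfsA lenD recur vs res'

-- the outer `for i,w in enumerate(d)` loop: pre holds the processed prefix reversed, so
-- d[:i] + d[i+1:] = pre.reverse ++ rest
def goWordsA (bo : List (List String)) (m n lenD : Int) (visited : List (Int × Int))
    (recur : List String → List (Int × Int) → Int) : List String → List String → Int → Int
  | _, [], res => res
  | pre, w :: rest, res =>
    match goConfsA lenD (fun v => recur (pre.reverse ++ rest) v) (configsA bo m n visited w) res with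
    | (res', true) => res'
    | (res', false) => goWordsA bo m n lenD visited recur (w :: pre) rest res'

-- max_words_recur; the Nat argument (= current length of d) only drives the recursion
def recurA (bo : List (List String)) (m n : Int) : Nat → List String → List (Int × Int) → Int
  | 0, _, _ => 0
  | k + 1, d, visited =>
    goWordsA bo m n (d.length : Int) visited (fun d' v => recurA bo m n k d' v) [] d 0

-- the asserts raise on empty bo / empty d: excluded by Pre_max_words
def max_words (bo : List (List String)) (d : List String) : Int :=
  let m : Int := bo.length
  let n : Int := ((PySem.List.pyGet? bo 0).getD []).length
  recurA bo m n d.length d []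

-- ===== PORT B =====
-- B's extend(r, c, w, path): all completed paths spelling w from (r,c); the path tuple is a
-- cons-list (((r,c),)+path = (r,c)::path); the string w is processed as its character list.
def extendB (bo : List (List String)) (m n : Int) : List Char → Int → Int → List (Int × Int) → List (List (Int × Int))
  | [], _, _, path => [path]
  | ch :: w', r, c, path =>
    if ¬(0 ≤ r ∧ r < m ∧ 0 ≤ c ∧ c < n) ∨ (r, c) ∈ path ∨ ¬(pvCell bo r c = String.singleton ch) then []
    else pvDirs.flatMap (fun dd => extendB bo m n w' (r + dd.1) (c + dd.2) ((r, c) :: path))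

-- one entry of B's placement index plist
def placementsB (bo : List (List String)) (m n : Int) (w : String) : List (List (Int × Int)) :=
  (PySem.List.pyRange 0 m 1).flatMap (fun r =>
    (PySem.List.pyRange 0 n 1).flatMap (fun c => extendB bo m n w.toList r c []))

-- B's best(i, occ): skip/take over the word index (the list of remaining placement-lists);
-- the occupied tuple occ + p is the list p ++ occ
def bestB : List (List (List (Int × Int))) → List (Int × Int) → Int
  | [], _ => 0
  | ps :: rest, occ =>
    ps.foldl (fun r p => if p.all (fun x => decide (x ∉ occ)) then max r (1 + bestB rest (p ++ occ)) else r)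
      (bestB rest occ)

def max_words_alt (bo : List (List String)) (d : List String) : Int :=
  let m : Int := bo.length
  let n : Int := ((PySem.List.pyGet? bo 0).getD []).length
  bestB (d.map (fun w => placementsB bo m n w)) []

-- ===== PRECONDITION & SPEC =====
-- Pre_ excludes empty bo and empty d (A's asserts raise AssertionError) and boards with a row
-- shorter than row 0, where bo[r][c] can raise IndexError (B's eager placement enumeration
-- raises there; A raises too unless its search happens to stop first — see claim cites).
def Pre_max_words (bo : List (List String)) (d : List String) : Prop :=
  bo ≠ [] ∧ d ≠ [] ∧ ∀ row ∈ bo, (bo.headD []).length ≤ row.length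
instance (bo : List (List String)) (d : List String) : Decidable (Pre_max_words bo d) := by
  unfold Pre_max_words; infer_instance

def pvWitness_max_words : List (List String) × List String := ([["a"]], ["a"])

def Spec_max_words (bo : List (List String)) (d : List String) (out : Int) : Prop := out = max_words_alt bo d
instance (bo : List (List String)) (d : List String) (out : Int) : Decidable (Spec_max_words bo d out) := by
  unfold Spec_max_words; infer_instance

-- ===== CLAIM (what is proved, stated in full; the proofs are below) =====
def Claim_equal_max_words : Prop := ∀ (bo : List (List String)) (d : List String), Dom_max_words bo d → Pre_max_words bo d → Spec_max_words bo d (max_words bo d)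

-- ===== LEMMAS AND PROOFS =====

-- generic facts about B's fold  r := max r (1 + f p) if cond p
theorem pvFoldl_ge_init {α : Type} (cond : α → Bool) (f : α → Int) :
    ∀ (ps : List α) (r0 : Int),
      r0 ≤ ps.foldl (fun r p => if cond p then max r (1 + f p) else r) r0 := by
  intro ps
  induction ps with
  | nil => intro r0; simp
  | cons p ps ih =>
    intro r0
    simp only [List.foldl_cons]
    refine le_trans ?_ (ih _)
    split
    · exact le_max_left _ _
    · exact le_refl _

theorem pvFoldl_ge_term {α : Type} (cond : α → Bool) (f : α → Int) :
    ∀ (ps : List α) (r0 : Int) (p : α), p ∈ ps → cond p = true →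
      1 + f p ≤ ps.foldl (fun r p => if cond p then max r (1 + f p) else r) r0 := by
  intro ps
  induction ps with
  | nil => intro r0 p h; simp at h
  | cons a ps ih =>
    intro r0 p hp hc
    simp only [List.foldl_cons]
    rcases List.mem_cons.mp hp with h | h
    · subst h
      refine le_trans ?_ (pvFoldl_ge_init cond f ps _)
      simp [hc]
    · exact ih _ p h hc

theorem pvFoldl_le {α : Type} (cond : α → Bool) (f : α → Int) (B : Int) :
    ∀ (ps : List α) (r0 : Int), r0 ≤ B → (∀ p ∈ ps, cond p = true → 1 + f p ≤ B) →
      ps.foldl (fun r p => if cond p then max r (1 + f p) else r) r0 ≤ B := by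
  intro ps
  induction ps with
  | nil => intro r0 h _; simpa using h
  | cons a ps ih =>
    intro r0 h hall
    simp only [List.foldl_cons]
    refine ih _ ?_ (fun p hp hc => hall p (List.mem_cons_of_mem _ hp) hc)
    split
    · rename_i hc
      exact max_le h (hall a (List.mem_cons_self) hc)
    · exact h

theorem pvFoldl_attain {α : Type} (cond : α → Bool) (f : α → Int) :
    ∀ (ps : List α) (r0 : Int),
      ps.foldl (fun r p => if cond p then max r (1 + f p) else r) r0 = r0 ∨
      ∃ p ∈ ps, cond p = true ∧
        ps.foldl (fun r p => if cond p then max r (1 + f p) else r) r0 = 1 + f p := by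
  intro ps
  induction ps with
  | nil => intro r0; left; simp
  | cons a ps ih =>
    intro r0
    simp only [List.foldl_cons]
    by_cases hc : cond a = true
    · simp only [hc, if_true]
      rcases ih (max r0 (1 + f a)) with h | ⟨p, hp, hcp, h⟩
      · rcases max_cases r0 (1 + f a) with ⟨hm, _⟩ | ⟨hm, _⟩
        · left; rw [h, hm]
        · right; exact ⟨a, List.mem_cons_self, hc, by rw [h, hm]⟩
      · right; exact ⟨p, List.mem_cons_of_mem _ hp, hcp, h⟩
    · simp only [hc]
      rcases ih r0 with h | ⟨p, hp, hcp, h⟩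
      · left; exact h
      · right; exact ⟨p, List.mem_cons_of_mem _ hp, hcp, h⟩

theorem bestB_nonneg : ∀ (L : List (List (List (Int × Int)))) (occ : List (Int × Int)), 0 ≤ bestB L occ := by
  intro L
  induction L with
  | nil => intro occ; simp [bestB]
  | cons ps rest ih =>
    intro occ
    simp only [bestB]
    exact le_trans (ih occ) (pvFoldl_ge_init _ _ ps _)

theorem bestB_le_len : ∀ (L : List (List (List (Int × Int)))) (occ : List (Int × Int)),
    bestB L occ ≤ (L.length : Int) := by
  intro L
  induction L with
  | nil => intro occ; simp [bestB]
  | cons ps rest ih =>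
    intro occ
    simp only [bestB, List.length_cons]
    refine pvFoldl_le _ _ _ ps _ ?_ ?_
    · have := ih occ; push_cast; omega
    · intro p _ _
      have := ih (p ++ occ); push_cast; omega

theorem bestB_congr : ∀ (L : List (List (List (Int × Int)))) (o1 o2 : List (Int × Int)),
    (∀ x, x ∈ o1 ↔ x ∈ o2) → bestB L o1 = bestB L o2 := by
  intro L
  induction L with
  | nil => intro o1 o2 _; simp [bestB]
  | cons ps rest ih =>
    intro o1 o2 h
    simp only [bestB]
    have hdec : (fun x : Int × Int => decide (x ∉ o1)) = (fun x => decide (x ∉ o2)) := by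
      funext x; simp [h x]
    have happ : ∀ p : List (Int × Int), bestB rest (p ++ o1) = bestB rest (p ++ o2) := by
      intro p
      exact ih _ _ (fun x => by simp [List.mem_append, h x])
    have hF : (fun (r : Int) (p : List (Int × Int)) =>
          if p.all (fun x => decide (x ∉ o1)) then max r (1 + bestB rest (p ++ o1)) else r) =
        (fun (r : Int) (p : List (Int × Int)) =>
          if p.all (fun x => decide (x ∉ o2)) then max r (1 + bestB rest (p ++ o2)) else r) := by
      funext r p
      rw [hdec, happ p]
    rw [hF, ih _ _ h]

theorem bestB_cons_ge (ps : List (List (Int × Int))) (L : List (List (List (Int × Int)))) (occ : List (Int × Int)) :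
    bestB L occ ≤ bestB (ps :: L) occ := by
  simp only [bestB]
  exact pvFoldl_ge_init _ _ ps _

theorem bestB_exchange : ∀ (L1 : List (List (List (Int × Int)))) (ps : List (List (Int × Int)))
    (L2 : List (List (List (Int × Int)))) (occ q : List (Int × Int)),
    q ∈ ps → (∀ x ∈ q, x ∉ occ) →
    1 + bestB (L1 ++ L2) (q ++ occ) ≤ bestB (L1 ++ ps :: L2) occ := by
  intro L1
  induction L1 with
  | nil =>
    intro ps L2 occ q hq hdisj
    simp only [List.nil_append]
    conv_rhs => rw [bestB]
    refine pvFoldl_ge_term _ _ ps _ q hq ?_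
    simp only [List.all_eq_true, decide_eq_true_eq]
    exact hdisj
  | cons a L1 ih =>
    intro ps L2 occ q hq hdisj
    simp only [List.cons_append]
    conv_lhs => rw [bestB]
    have hfold : (a.foldl
        (fun r p => if p.all (fun x => decide (x ∉ (q ++ occ))) then
            max r (1 + bestB (L1 ++ L2) (p ++ (q ++ occ))) else r)
        (bestB (L1 ++ L2) (q ++ occ))) ≤ bestB (a :: (L1 ++ ps :: L2)) occ - 1 := by
      refine pvFoldl_le _ _ _ a _ ?_ ?_
      · have h1 := ih ps L2 occ q hq hdisj
        have h2 := bestB_cons_ge a (L1 ++ ps :: L2) occ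
        omega
      · intro p hp hcond
        simp only [List.all_eq_true, decide_eq_true_eq, List.mem_append] at hcond
        push Not at hcond
        have hqdisj : ∀ x ∈ q, x ∉ p ++ occ := by
          intro x hx
          simp only [List.mem_append]
          push Not
          exact ⟨fun hxp => (hcond x hxp).1 hx, hdisj x hx⟩
        have h1 : 1 + bestB (L1 ++ L2) (q ++ (p ++ occ)) ≤ bestB (L1 ++ ps :: L2) (p ++ occ) :=
          ih ps L2 (p ++ occ) q hq hqdisj
        have hcg : bestB (L1 ++ L2) (p ++ (q ++ occ)) = bestB (L1 ++ L2) (q ++ (p ++ occ)) := by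
          apply bestB_congr
          intro x; simp only [List.mem_append]; tauto
        have h2 : 1 + bestB (L1 ++ ps :: L2) (p ++ occ) ≤ bestB (a :: (L1 ++ ps :: L2)) occ := by
          conv_rhs => rw [bestB]
          refine pvFoldl_ge_term _ _ a _ p hp ?_
          simp only [List.all_eq_true, decide_eq_true_eq]
          exact fun x hx => (hcond x hx).2
        omega
    omega

theorem bestB_attain : ∀ (L : List (List (List (Int × Int)))) (occ : List (Int × Int)),
    bestB L occ ≤ 0 ∨
    ∃ L1 ps L2 q, L = L1 ++ ps :: L2 ∧ q ∈ ps ∧ (∀ x ∈ q, x ∉ occ) ∧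
      bestB L occ ≤ 1 + bestB (L1 ++ L2) (q ++ occ) := by
  intro L
  induction L with
  | nil => intro occ; left; simp [bestB]
  | cons ps rest ih =>
    intro occ
    rw [bestB]
    rcases pvFoldl_attain (fun p => p.all (fun x => decide (x ∉ occ)))
        (fun p => bestB rest (p ++ occ)) ps (bestB rest occ) with h | ⟨p, hp, hc, h⟩
    · rw [h]
      rcases ih occ with h0 | ⟨L1, ps', L2, q, hL, hq, hdisj, hle⟩
      · left; exact h0
      · right
        refine ⟨ps :: L1, ps', L2, q, by rw [hL]; simp, hq, hdisj, ?_⟩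
        calc bestB rest occ ≤ 1 + bestB (L1 ++ L2) (q ++ occ) := hle
          _ ≤ 1 + bestB (ps :: (L1 ++ L2)) (q ++ occ) := by
              have := bestB_cons_ge ps (L1 ++ L2) (q ++ occ); omega
          _ = 1 + bestB ((ps :: L1) ++ L2) (q ++ occ) := by simp
    · right
      refine ⟨[], ps, rest, p, rfl, hp, ?_, ?_⟩
      · simpa [List.all_eq_true] using hc
      · rw [h]; simp

-- every output of extend contains every cell of the path it started from
theorem extendB_sup (bo : List (List String)) (m n : Int) :
    ∀ (w : List Char) (r c : Int) (path q : List (Int × Int)),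
      q ∈ extendB bo m n w r c path → ∀ x ∈ path, x ∈ q := by
  intro w
  induction w with
  | nil =>
    intro r c path q hq x hx
    simp only [extendB, List.mem_singleton] at hq
    subst hq; exact hx
  | cons ch w ih =>
    intro r c path q hq x hx
    simp only [extendB] at hq
    split at hq
    · simp at hq
    · simp only [List.mem_flatMap] at hq
      obtain ⟨dd, _, hq⟩ := hq
      exact ih _ _ _ q hq x (List.mem_cons_of_mem _ hx)

-- A's dfs from visited = path ++ vis is B's extend from path, keeping exactly the outputs
-- whose cells avoid vis, with vis re-appended
theorem dfsA_eq (bo : List (List String)) (m n : Int) :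
    ∀ (w : List Char) (path vis : List (Int × Int)) (r c : Int),
      dfsA bo m n w (path ++ vis) r c =
      ((extendB bo m n w r c path).filter (fun q => q.all (fun x => decide (x ∈ path ∨ x ∉ vis)))).map
        (fun q => q ++ vis) := by
  intro w
  induction w with
  | nil =>
    intro path vis r c
    rw [dfsA, extendB, List.filter_cons_of_pos
      (by simp only [List.all_eq_true, decide_eq_true_eq]; exact fun x hx => Or.inl hx),
      List.filter_nil, List.map_cons, List.map_nil]
  | cons ch w ih =>
    intro path vis r c
    by_cases hb : 0 ≤ r ∧ r < m ∧ 0 ≤ c ∧ c < n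
    · by_cases hpm : (r, c) ∈ path
      · -- dfsA invalid ((r,c) ∈ path ++ vis), extendB empty
        rw [dfsA, extendB, if_neg, if_pos]
        · simp
        · right; left; exact hpm
        · simp only [List.mem_append, not_and]
          intro _ _ _ _ h
          exact absurd (Or.inl hpm) h
      · by_cases hc : pvCell bo r c = String.singleton ch
        · by_cases hv : (r, c) ∈ vis
          · -- dfsA invalid, extendB recurses but every output contains (r,c) ∈ vis ∖ path
            rw [dfsA, extendB, if_neg, if_neg]
            · symm
              rw [List.map_eq_nil_iff, List.filter_eq_nil_iff]
              intro q hq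
              simp only [List.mem_flatMap] at hq
              obtain ⟨dd, _, hq⟩ := hq
              have hrc : (r, c) ∈ q :=
                extendB_sup bo m n w _ _ _ q hq (r, c) List.mem_cons_self
              simp only [List.all_eq_true, decide_eq_true_eq]
              push Not
              exact ⟨(r, c), hrc, hpm, hv⟩
            · push Not
              exact ⟨hb, hpm, hc⟩
            · simp only [List.mem_append, not_and]
              intro _ _ _ _ h
              exact absurd (Or.inr hv) h
          · -- both valid: recurse
            rw [dfsA, extendB, if_pos, if_neg]
            · have hpred : ∀ q : List (Int × Int),
                  (q.all (fun x => decide (x ∈ (r, c) :: path ∨ x ∉ vis))) =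
                  (q.all (fun x => decide (x ∈ path ∨ x ∉ vis))) := by
                intro q
                congr 1
                funext x
                by_cases hx : x = (r, c)
                · subst hx; simp [hv, hpm]
                · simp [List.mem_cons, hx]
              simp only [pvDirs, List.flatMap_cons, List.flatMap_nil, List.append_nil,
                List.filter_append, List.map_append]
              have step : ∀ dr dc : Int,
                  dfsA bo m n w ((r, c) :: (path ++ vis)) (r + dr) (c + dc) =
                  ((extendB bo m n w (r + dr) (c + dc) ((r, c) :: path)).filter
                    (fun q => q.all (fun x => decide (x ∈ path ∨ x ∉ vis)))).map
                    (fun q => q ++ vis) := by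
                intro dr dc
                have := ih ((r, c) :: path) vis (r + dr) (c + dc)
                simp only [List.cons_append] at this ⊢
                rw [this]
                congr 1
                apply List.filter_congr
                intro q _
                exact hpred q
              rw [step, step, step, step]
            · push Not
              exact ⟨hb, hpm, hc⟩
            · refine ⟨hb.1, hb.2.1, hb.2.2.1, hb.2.2.2, ?_, hc⟩
              simp only [List.mem_append]
              push Not
              exact ⟨hpm, hv⟩
        · -- cell mismatch: both empty
          rw [dfsA, extendB, if_neg, if_pos]
          · simp
          · right; right; exact hc
          · simp only [not_and]
            intro _ _ _ _ _
            exact hc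
    · -- out of bounds: both empty
      rw [dfsA, extendB, if_neg, if_pos]
      · simp
      · left; exact hb
      · intro h
        exact hb ⟨h.1, h.2.1, h.2.2.1, h.2.2.2.1⟩

theorem configsA_mem (bo : List (List String)) (m n : Int) (vis : List (Int × Int)) (w : String)
    (v : List (Int × Int)) :
    v ∈ configsA bo m n vis w ↔
      ∃ q, q ∈ placementsB bo m n w ∧ (∀ x ∈ q, x ∉ vis) ∧ v = q ++ vis := by
  have hdfs : ∀ (r c : Int), dfsA bo m n w.toList vis r c =
      ((extendB bo m n w.toList r c []).filter (fun q => q.all (fun x => decide (x ∉ vis)))).map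
        (fun q => q ++ vis) := by
    intro r c
    have h := dfsA_eq bo m n w.toList [] vis r c
    simp only [List.nil_append] at h
    rw [h]
    congr 1
    apply List.filter_congr
    intro q _
    congr 1
    funext x
    simp
  constructor
  · intro hv
    simp only [configsA, List.mem_flatMap, hdfs, List.mem_map, List.mem_filter,
      List.all_eq_true, decide_eq_true_eq] at hv
    obtain ⟨r, hr, c, hc, q, ⟨hq, hdisj⟩, rfl⟩ := hv
    refine ⟨q, ?_, hdisj, rfl⟩
    simp only [placementsB, List.mem_flatMap]
    exact ⟨r, hr, c, hc, hq⟩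
  · rintro ⟨q, hq, hdisj, rfl⟩
    simp only [placementsB, List.mem_flatMap] at hq
    obtain ⟨r, hr, c, hc, hq⟩ := hq
    simp only [configsA, List.mem_flatMap, hdfs, List.mem_map, List.mem_filter,
      List.all_eq_true, decide_eq_true_eq]
    exact ⟨r, hr, c, hc, q, ⟨hq, hdisj⟩, rfl⟩

theorem goConfsA_done (lenD : Int) (recur : List (Int × Int) → Int) :
    ∀ (cs : List (List (Int × Int))) (res : Int),
      (goConfsA lenD recur cs res).2 = true → (goConfsA lenD recur cs res).1 = lenD := by
  intro cs
  induction cs with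
  | nil => intro res h; simp [goConfsA] at h
  | cons v vs ih =>
    intro res h
    simp only [goConfsA] at h ⊢
    split at h
    · rename_i heq
      rw [if_pos heq]
      exact heq
    · rename_i heq
      rw [if_neg heq]
      exact ih _ h

theorem goConfsA_le (lenD : Int) (recur : List (Int × Int) → Int) (B : Int) :
    ∀ (cs : List (List (Int × Int))) (res : Int), res ≤ B → (∀ v ∈ cs, 1 + recur v ≤ B) →
      (goConfsA lenD recur cs res).1 ≤ B := by
  intro cs
  induction cs with
  | nil => intro res h _; simpa [goConfsA] using h
  | cons v vs ih =>
    intro res h hall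
    simp only [goConfsA]
    split
    · exact max_le h (hall v List.mem_cons_self)
    · exact ih _ (max_le h (hall v List.mem_cons_self))
        (fun u hu => hall u (List.mem_cons_of_mem _ hu))

theorem goConfsA_ge (lenD : Int) (recur : List (Int × Int) → Int) :
    ∀ (cs : List (List (Int × Int))) (res : Int),
      (∀ v ∈ cs, 1 + recur v ≤ lenD) → res ≤ lenD →
      res ≤ (goConfsA lenD recur cs res).1 ∧
      ∀ v ∈ cs, 1 + recur v ≤ (goConfsA lenD recur cs res).1 := by
  intro cs
  induction cs with
  | nil => intro res _ _; exact ⟨le_refl _, by simp⟩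
  | cons v vs ih =>
    intro res hall hres
    simp only [goConfsA]
    split
    · rename_i heq
      constructor
      · exact le_max_left _ _
      · intro u hu
        rw [heq]
        exact hall u hu
    · rename_i heq
      have hle : max res (1 + recur v) ≤ lenD :=
        max_le hres (hall v List.mem_cons_self)
      obtain ⟨h1, h2⟩ := ih (max res (1 + recur v))
        (fun u hu => hall u (List.mem_cons_of_mem _ hu)) hle
      refine ⟨le_trans (le_max_left _ _) h1, ?_⟩
      intro u hu
      rcases List.mem_cons.mp hu with rfl | hu
      · exact le_trans (le_max_right _ _) h1
      · exact h2 u hu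

theorem goWordsA_le (bo : List (List String)) (m n lenD : Int) (visited : List (Int × Int))
    (recur : List String → List (Int × Int) → Int) (B : Int) :
    ∀ (suf pre : List String) (res : Int), res ≤ B →
      (∀ s1 w s2, suf = s1 ++ w :: s2 → ∀ v ∈ configsA bo m n visited w,
        1 + recur (pre.reverse ++ (s1 ++ s2)) v ≤ B) →
      goWordsA bo m n lenD visited recur pre suf res ≤ B := by
  intro suf
  induction suf with
  | nil => intro pre res hres _; exact hres
  | cons w rest ih =>
    intro pre res hres hterms
    have htermsC : ∀ v ∈ configsA bo m n visited w,
        1 + recur (pre.reverse ++ rest) v ≤ B := by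
      intro v hv
      simpa using hterms [] w rest rfl v hv
    rw [goWordsA]
    rcases hg : goConfsA lenD (fun v => recur (pre.reverse ++ rest) v)
        (configsA bo m n visited w) res with ⟨res', done⟩
    have hres2 : res' ≤ B := by
      have := goConfsA_le lenD (fun v => recur (pre.reverse ++ rest) v) B
        (configsA bo m n visited w) res hres htermsC
      rw [hg] at this
      exact this
    cases done
    · simp only []
      refine ih (w :: pre) res' hres2 ?_
      intro s1 w' s2 hsuf v hv
      have := hterms (w :: s1) w' s2 (by rw [hsuf]; simp) v hv
      simpa [List.append_assoc] using this
    · exact hres2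

theorem goWordsA_ge (bo : List (List String)) (m n lenD : Int) (visited : List (Int × Int))
    (recur : List String → List (Int × Int) → Int) :
    ∀ (suf pre : List String) (res : Int),
      (∀ s1 w s2, suf = s1 ++ w :: s2 → ∀ v ∈ configsA bo m n visited w,
        1 + recur (pre.reverse ++ (s1 ++ s2)) v ≤ lenD) →
      res ≤ lenD →
      res ≤ goWordsA bo m n lenD visited recur pre suf res ∧
      ∀ s1 w s2, suf = s1 ++ w :: s2 → ∀ v ∈ configsA bo m n visited w,
        1 + recur (pre.reverse ++ (s1 ++ s2)) v ≤ goWordsA bo m n lenD visited recur pre suf res := by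
  intro suf
  induction suf with
  | nil =>
    intro pre res _ _
    refine ⟨le_refl _, ?_⟩
    intro s1 w s2 hsuf
    exact absurd hsuf (by simp)
  | cons w rest ih =>
    intro pre res hterms hres
    have htermsC : ∀ v ∈ configsA bo m n visited w,
        1 + recur (pre.reverse ++ rest) v ≤ lenD := by
      intro v hv
      simpa using hterms [] w rest rfl v hv
    rw [goWordsA]
    rcases hg : goConfsA lenD (fun v => recur (pre.reverse ++ rest) v)
        (configsA bo m n visited w) res with ⟨res', done⟩
    have hge := goConfsA_ge lenD (fun v => recur (pre.reverse ++ rest) v)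
      (configsA bo m n visited w) res htermsC hres
    rw [hg] at hge
    have hresle : res' ≤ lenD := by
      have := goConfsA_le lenD (fun v => recur (pre.reverse ++ rest) v) lenD
        (configsA bo m n visited w) res hres htermsC
      rw [hg] at this
      exact this
    have hdone : done = true → res' = lenD := by
      intro hd
      have := goConfsA_done lenD (fun v => recur (pre.reverse ++ rest) v)
        (configsA bo m n visited w) res (by rw [hg]; exact hd)
      rw [hg] at this
      exact this
    cases done
    · simp only []
      have hrest : ∀ s1 w' s2, rest = s1 ++ w' :: s2 → ∀ v ∈ configsA bo m n visited w',
          1 + recur ((w :: pre).reverse ++ (s1 ++ s2)) v ≤ lenD := by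
        intro s1 w' s2 hsuf v hv
        have := hterms (w :: s1) w' s2 (by rw [hsuf]; simp) v hv
        simpa [List.append_assoc] using this
      obtain ⟨ih1, ih2⟩ := ih (w :: pre) res' hrest hresle
      refine ⟨le_trans hge.1 ih1, ?_⟩
      intro s1 w' s2 hsuf v hv
      cases s1 with
      | nil =>
        simp only [List.nil_append, List.cons.injEq] at hsuf
        obtain ⟨rfl, rfl⟩ := hsuf
        refine le_trans ?_ ih1
        simpa using hge.2 v hv
      | cons a s1' =>
        simp only [List.cons_append, List.cons.injEq] at hsuf
        obtain ⟨rfl, hsuf⟩ := hsuf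
        have := ih2 s1' w' s2 hsuf v hv
        simpa [List.append_assoc] using this
    · simp only []
      have hlen := hdone rfl
      refine ⟨hge.1, ?_⟩
      intro s1 w' s2 hsuf v hv
      rw [hlen]
      cases s1 with
      | nil =>
        simp only [List.nil_append, List.cons.injEq] at hsuf
        obtain ⟨rfl, rfl⟩ := hsuf
        simpa using htermsC v hv
      | cons a s1' =>
        simp only [List.cons_append, List.cons.injEq] at hsuf
        obtain ⟨rfl, hsuf⟩ := hsuf
        have := hterms (w :: s1') w' s2 (by rw [hsuf]; simp) v hv
        simpa [List.append_assoc] using this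

-- pull a decomposition of d.map f back to d
theorem pvMapSplit {A B : Type} (f : A → B) :
    ∀ (L1 : List B) (d : List A) (ps : B) (L2 : List B), d.map f = L1 ++ ps :: L2 →
      ∃ s1 w s2, d = s1 ++ w :: s2 ∧ s1.map f = L1 ∧ f w = ps ∧ s2.map f = L2 := by
  intro L1
  induction L1 with
  | nil =>
    intro d ps L2 h
    cases d with
    | nil => simp at h
    | cons a d' =>
      simp only [List.map_cons, List.nil_append, List.cons.injEq] at h
      exact ⟨[], a, d', rfl, rfl, h.1, h.2⟩
  | cons b L1' ih =>
    intro d ps L2 h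
    cases d with
    | nil => simp at h
    | cons a d' =>
      simp only [List.map_cons, List.cons_append, List.cons.injEq] at h
      obtain ⟨s1, w, s2, rfl, hs1, hw, hs2⟩ := ih d' ps L2 h.2
      exact ⟨a :: s1, w, s2, rfl, by simp [h.1, hs1], hw, hs2⟩

theorem recurA_eq (bo : List (List String)) (m n : Int) :
    ∀ (k : Nat) (d : List String) (vis : List (Int × Int)), d.length = k →
      recurA bo m n k d vis = bestB (d.map (fun w => placementsB bo m n w)) vis := by
  intro k
  induction k with
  | zero =>
    intro d vis hd
    cases d with
    | nil => simp [recurA, bestB]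
    | cons a d' => simp at hd
  | succ k ih =>
    intro d vis hd
    rw [recurA]
    apply le_antisymm
    · apply goWordsA_le
      · exact bestB_nonneg _ _
      · intro s1 w s2 hsuf v hv
        rw [configsA_mem] at hv
        obtain ⟨q, hq, hdisj, rfl⟩ := hv
        have hlen : (s1 ++ s2).length = k := by
          subst hsuf; simp at hd ⊢; omega
        simp only [List.reverse_nil, List.nil_append]
        rw [ih (s1 ++ s2) (q ++ vis) hlen]
        have hx := bestB_exchange (s1.map (fun w => placementsB bo m n w)) (placementsB bo m n w)
          (s2.map (fun w => placementsB bo m n w)) vis q hq hdisj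
        rw [← List.map_append] at hx
        subst hsuf
        simpa using hx
    · have hlenD : ∀ s1 w s2, d = s1 ++ w :: s2 → ∀ v ∈ configsA bo m n vis w,
          1 + (fun d' v => recurA bo m n k d' v) (List.reverse ([] : List String) ++ (s1 ++ s2)) v
            ≤ (d.length : Int) := by
        intro s1 w s2 hsuf v hv
        simp only [List.reverse_nil, List.nil_append]
        have hlen : (s1 ++ s2).length = k := by
          subst hsuf; simp at hd ⊢; omega
        rw [ih (s1 ++ s2) v hlen]
        have h1 := bestB_le_len ((s1 ++ s2).map (fun w => placementsB bo m n w)) v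
        rw [List.length_map, hlen] at h1
        subst hsuf
        simp only [List.length_append, List.length_cons]
        simp only [List.length_append] at hlen
        push_cast
        omega
      obtain ⟨hge1, hge2⟩ := goWordsA_ge bo m n (d.length : Int) vis
        (fun d' v => recurA bo m n k d' v) d [] 0 hlenD (by positivity)
      rcases bestB_attain (d.map (fun w => placementsB bo m n w)) vis with
        h0 | ⟨L1, ps, L2, q, hL, hq, hdisj, hle⟩
      · exact le_trans h0 hge1
      · obtain ⟨s1, w, s2, rfl, hs1, hw, hs2⟩ :=
          pvMapSplit (fun w => placementsB bo m n w) L1 d ps L2 hL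
        have hv : q ++ vis ∈ configsA bo m n vis w := by
          rw [configsA_mem]
          exact ⟨q, hw ▸ hq, hdisj, rfl⟩
        have hterm := hge2 s1 w s2 rfl (q ++ vis) hv
        simp only [List.reverse_nil, List.nil_append] at hterm
        have hlen : (s1 ++ s2).length = k := by
          simp at hd ⊢; omega
        rw [ih (s1 ++ s2) (q ++ vis) hlen] at hterm
        have heqL : (s1 ++ s2).map (fun w => placementsB bo m n w) = L1 ++ L2 := by
          rw [List.map_append, hs1, hs2]
        rw [heqL] at hterm
        exact le_trans hle hterm

theorem max_words_eq_alt (bo : List (List String)) (d : List String) :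
    max_words bo d = max_words_alt bo d := by
  simp only [max_words, max_words_alt]
  exact recurA_eq bo _ _ d.length d [] rfl

-- ===== VERDICT (by name: the statement is the Claim_ definition above) =====
theorem max_words_spec : Claim_equal_max_words := by
  intro bo d _ _
  exact max_words_eq_alt bo d
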